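-- pv_equiv track=rewrite | github.com/Jacob19999/CIS-121-Lab | Week 6/Solution.py | count
-- ===== SOURCE A (Python) =====
-- def count(cards):
--     total = 0
--     for card in cards:
--         if card in ['2', '3', '4', '5', '6']:
--             total += 1
--         elif card in ['10', 'J', 'Q', 'K', 'A']:
--             total -= 1
--     return total
-- ===== SOURCE B (Python) =====
-- def count(cards):
--     # Build a frequency table of the hand once, then read off the ten
--     # category counts from it; no per-card branching.
--     freq = {}
--     for c in cards:
--         freq[c] = freq.get(c, 0) + 1
--     total = 0
--     for c in ('2', '3', '4', '5', '6'):
--         total += freq.get(c, 0)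
--     for c in ('10', 'J', 'Q', 'K', 'A'):
--         total -= freq.get(c, 0)
--     return total
-- ===== Notes on version B (the rewrite author's own statement) =====
-- stated objective: alternative
-- what changed: Instead of branching per card, B builds a frequency dictionary of the hand in one pass and then aggregates by iterating over the ten fixed category keys, adding the low-card frequencies and subtracting the high-card ones.
import Mathlib
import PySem

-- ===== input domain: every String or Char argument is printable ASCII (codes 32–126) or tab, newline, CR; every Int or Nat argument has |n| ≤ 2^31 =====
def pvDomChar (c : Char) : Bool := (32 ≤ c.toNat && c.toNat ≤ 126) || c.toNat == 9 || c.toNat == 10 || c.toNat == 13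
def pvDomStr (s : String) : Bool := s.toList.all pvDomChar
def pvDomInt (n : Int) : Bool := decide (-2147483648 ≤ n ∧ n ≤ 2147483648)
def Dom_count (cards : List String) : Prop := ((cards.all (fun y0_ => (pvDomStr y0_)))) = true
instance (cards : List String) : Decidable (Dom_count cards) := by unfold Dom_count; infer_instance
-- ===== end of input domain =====

-- ===== PORT A =====
-- B replaces A's per-card if/elif branching loop by a frequency dictionary built once,
-- then aggregates over the ten fixed category keys (alternative decomposition).
def count (cards : List String) : Int :=
  cards.foldl (fun total card =>
    if card ∈ ["2", "3", "4", "5", "6"] then total + 1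
    else if card ∈ ["10", "J", "Q", "K", "A"] then total - 1
    else total) 0

-- ===== PORT B =====
def count_alt (cards : List String) : Int :=
  let freq : PySem.Dict String Int :=
    cards.foldl (fun d c => d.insert c (d.getD c 0 + 1)) PySem.Dict.empty
  let total : Int :=
    ["2", "3", "4", "5", "6"].foldl (fun t c => t + freq.getD c 0) 0
  ["10", "J", "Q", "K", "A"].foldl (fun t c => t - freq.getD c 0) total

-- ===== PRECONDITION & SPEC =====
def Spec_count (cards : List String) (out : Int) : Prop := out = count_alt cards
instance (cards : List String) (out : Int) : Decidable (Spec_count cards out) := by unfold Spec_count; infer_instance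

-- ===== CLAIM =====
def Claim_equal_count : Prop := ∀ (cards : List String), Dom_count cards → Spec_count cards (count cards)

-- ===== LEMMAS AND PROOFS =====

-- closed form for both ports: signed sum of the ten category counts
def catSum (cs : List String) : Int :=
  (cs.count "2" + cs.count "3" + cs.count "4" + cs.count "5" + cs.count "6" : Int)
  - (cs.count "10" + cs.count "J" + cs.count "Q" + cs.count "K" + cs.count "A" : Int)

theorem count_foldl_general (cards : List String) (t : Int) :
    cards.foldl (fun total card =>
      if card ∈ ["2", "3", "4", "5", "6"] then total + 1
      else if card ∈ ["10", "J", "Q", "K", "A"] then total - 1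
      else total) t = t + catSum cards := by
  induction cards generalizing t with
  | nil => simp [catSum]
  | cons c cs ih =>
    rw [List.foldl_cons, ih]
    unfold catSum
    simp only [List.count_cons]
    by_cases h1 : c ∈ ["2", "3", "4", "5", "6"]
    · rw [if_pos h1]
      simp only [List.mem_cons, List.not_mem_nil, or_false] at h1
      rcases h1 with h | h | h | h | h <;> subst h <;> simp <;> ring
    · rw [if_neg h1]
      by_cases h2 : c ∈ ["10", "J", "Q", "K", "A"]
      · rw [if_pos h2]
        simp only [List.mem_cons, List.not_mem_nil, or_false] at h2
        rcases h2 with h | h | h | h | h <;> subst h <;> simp <;> ring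
      · rw [if_neg h2]
        simp only [List.mem_cons, List.not_mem_nil, or_false, not_or] at h1 h2
        obtain ⟨n1, n2, n3, n4, n5⟩ := h1
        obtain ⟨m1, m2, m3, m4, m5⟩ := h2
        simp [beq_iff_eq, n1, n2, n3, n4, n5, m1, m2, m3, m4, m5]

theorem count_alt_eq_catSum (cards : List String) : count_alt cards = catSum cards := by
  unfold count_alt catSum
  rw [PySem.Dict.foldl_insert_getD_add_one_eq_counter]
  simp [List.foldl_cons, PySem.Dict.getD_counter]
  ring

-- ===== VERDICT =====
theorem count_spec : Claim_equal_count := by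
  intro cards _
  unfold Spec_count count
  rw [count_foldl_general, count_alt_eq_catSum]
  simp
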